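-- pv_equiv track=rewrite | github.com/Sauvageduck24/ClearSar | src/dino_train.py | compute_tiles
-- ===== SOURCE A (Python) =====
-- from typing import Any, Dict, List, Optional, Tuple
--
-- def compute_tiles(img_w: int, img_h: int, tile_size: int, overlap: int) -> List[Tuple[int, int, int, int]]:
--     stride = tile_size - overlap
--     tiles = []
--     y = 0
--     while y < img_h:
--         y2 = min(y + tile_size, img_h)
--         x = 0
--         while x < img_w:
--             x2 = min(x + tile_size, img_w)
--             tiles.append((x, y, x2, y2))
--             if x2 == img_w:
--                 break
--             x += stride
--         if y2 == img_h:
--             break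
--         y += stride
--     return tiles
-- ===== SOURCE B (Python) =====
-- def compute_tiles(img_w, img_h, tile_size, overlap):
--     stride = tile_size - overlap
--
--     def count(limit):
--         # closed-form number of tile rows/columns along one axis
--         if limit <= 0:
--             return 0
--         if tile_size >= limit:
--             return 1
--         return min(-(-limit // stride), -(-(limit - tile_size) // stride) + 1)
--
--     ny = count(img_h)
--     if ny == 0:
--         return []
--     nx = count(img_w)
--     return [(i * stride, j * stride,
--              min(i * stride + tile_size, img_w),
--              min(j * stride + tile_size, img_h))
--             for j in range(ny) for i in range(nx)]
-- ===== Notes on version B (the rewrite author's own statement) =====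
-- stated objective: alternative
-- what changed: B computes the per-axis tile counts by closed-form ceiling division and emits every tile by pure index arithmetic over two ranges, instead of A's nested clamp-and-break while-loop scans; Pre_ excludes only the inputs on which A loops forever (non-positive stride with a dimension exceeding tile_size).
import Mathlib
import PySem

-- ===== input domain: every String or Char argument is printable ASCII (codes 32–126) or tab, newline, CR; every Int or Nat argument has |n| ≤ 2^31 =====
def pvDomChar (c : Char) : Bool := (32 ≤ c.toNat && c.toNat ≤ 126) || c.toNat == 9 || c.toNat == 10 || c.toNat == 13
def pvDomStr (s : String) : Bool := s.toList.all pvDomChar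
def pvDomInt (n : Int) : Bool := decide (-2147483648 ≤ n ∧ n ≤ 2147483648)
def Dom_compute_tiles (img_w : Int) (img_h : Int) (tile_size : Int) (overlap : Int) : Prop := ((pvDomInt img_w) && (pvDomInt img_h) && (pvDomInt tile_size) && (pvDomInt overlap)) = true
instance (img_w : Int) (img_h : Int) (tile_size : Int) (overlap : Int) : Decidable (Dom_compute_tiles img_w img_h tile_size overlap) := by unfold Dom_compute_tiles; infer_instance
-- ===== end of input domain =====

-- B replaces A's clamp-and-break scanning loops by closed-form ceiling-division tile counts
-- and pure index arithmetic over ranges (alternative algorithm; no speed claim).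

-- ===== PORT A =====
-- inner `while x < img_w` loop of A (fuel exceeds the iteration count whenever the Python loop terminates)
def pvRowA (img_w tile_size stride y y2 : Int) : Nat → Int → List (Int × Int × Int × Int) → List (Int × Int × Int × Int)
  | 0, _, acc => acc
  | fuel + 1, x, acc =>
    if x < img_w then
      let x2 := min (x + tile_size) img_w
      let acc' := acc ++ [(x, y, x2, y2)]
      if x2 = img_w then acc' else pvRowA img_w tile_size stride y y2 fuel (x + stride) acc'
    else acc

-- outer `while y < img_h` loop of A
def pvColA (img_w img_h tile_size stride : Int) : Nat → Int → List (Int × Int × Int × Int) → List (Int × Int × Int × Int)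
  | 0, _, acc => acc
  | fuel + 1, y, acc =>
    if y < img_h then
      let y2 := min (y + tile_size) img_h
      let acc' := pvRowA img_w tile_size stride y y2 (img_w.toNat + 1) 0 acc
      if y2 = img_h then acc' else pvColA img_w img_h tile_size stride fuel (y + stride) acc'
    else acc

def compute_tiles (img_w : Int) (img_h : Int) (tile_size : Int) (overlap : Int) : List (Int × Int × Int × Int) :=
  pvColA img_w img_h tile_size (tile_size - overlap) (img_h.toNat + 1) 0 []

-- ===== PORT B =====
-- B's closed-form per-axis tile count (`count` in Source B); `-(-a // stride)` is Python ceiling division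
def pvCountB (tile_size stride limit : Int) : Int :=
  if limit ≤ 0 then 0
  else if tile_size ≥ limit then 1
  else min (-(PySem.Int.floordiv (-limit) stride))
           (-(PySem.Int.floordiv (-(limit - tile_size)) stride) + 1)

def compute_tiles_alt (img_w : Int) (img_h : Int) (tile_size : Int) (overlap : Int) : List (Int × Int × Int × Int) :=
  let stride := tile_size - overlap
  let ny := pvCountB tile_size stride img_h
  if ny = 0 then []
  else
    let nx := pvCountB tile_size stride img_w
    (PySem.List.pyRange 0 ny 1).flatMap (fun j =>
      (PySem.List.pyRange 0 nx 1).map (fun i =>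
        (i * stride, j * stride, min (i * stride + tile_size) img_w, min (j * stride + tile_size) img_h)))

-- ===== PRECONDITION & SPEC =====
-- Pre_ excludes exactly the inputs on which the Python A never returns: with a non-positive
-- stride and a positive dimension exceeding tile_size, A's while loop runs forever.
def Pre_compute_tiles (img_w : Int) (img_h : Int) (tile_size : Int) (overlap : Int) : Prop :=
  0 < tile_size - overlap ∨ img_h ≤ 0 ∨ (img_h ≤ tile_size ∧ (img_w ≤ 0 ∨ img_w ≤ tile_size))
instance (img_w : Int) (img_h : Int) (tile_size : Int) (overlap : Int) : Decidable (Pre_compute_tiles img_w img_h tile_size overlap) := by unfold Pre_compute_tiles; infer_instance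

def pvWitness_compute_tiles : Int × Int × Int × Int := (10, 10, 4, 1)

def Spec_compute_tiles (img_w : Int) (img_h : Int) (tile_size : Int) (overlap : Int) (out : List (Int × Int × Int × Int)) : Prop := out = compute_tiles_alt img_w img_h tile_size overlap
instance (img_w : Int) (img_h : Int) (tile_size : Int) (overlap : Int) (out : List (Int × Int × Int × Int)) : Decidable (Spec_compute_tiles img_w img_h tile_size overlap out) := by unfold Spec_compute_tiles; infer_instance

-- ===== CLAIM =====
def Claim_equal_compute_tiles : Prop := ∀ (img_w : Int) (img_h : Int) (tile_size : Int) (overlap : Int), Dom_compute_tiles img_w img_h tile_size overlap → Pre_compute_tiles img_w img_h tile_size overlap → Spec_compute_tiles img_w img_h tile_size overlap (compute_tiles img_w img_h tile_size overlap)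

-- ===== LEMMAS AND PROOFS =====

-- proof-only helper: the common 1-D shape of A's two loops
def pvIv (limit tile_size stride : Int) : Nat → Int → List (Int × Int) → List (Int × Int)
  | 0, _, acc => acc
  | fuel + 1, p, acc =>
    if p < limit then
      let p2 := min (p + tile_size) limit
      let acc' := acc ++ [(p, p2)]
      if p2 = limit then acc' else pvIv limit tile_size stride fuel (p + stride) acc'
    else acc

theorem pvIv_acc (limit tile_size stride : Int) (fuel : Nat) (p : Int) (acc : List (Int × Int)) :
    pvIv limit tile_size stride fuel p acc = acc ++ pvIv limit tile_size stride fuel p [] := by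
  induction fuel generalizing p acc with
  | zero => simp [pvIv]
  | succ n ih =>
    simp only [pvIv]
    split_ifs with h1 h2
    · simp
    · rw [ih (p + stride) (acc ++ [(p, min (p + tile_size) limit)]),
          ih (p + stride) ([] ++ [(p, min (p + tile_size) limit)])]
      simp
    · simp

theorem pvIv_cons (limit tile_size stride : Int) (fuel : Nat) (p : Int) :
    pvIv limit tile_size stride (fuel + 1) p []
      = if p < limit then
          (if min (p + tile_size) limit = limit then [(p, min (p + tile_size) limit)]
           else (p, min (p + tile_size) limit) :: pvIv limit tile_size stride fuel (p + stride) [])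
        else [] := by
  simp only [pvIv]
  split_ifs with h1 h2
  · simp
  · rw [pvIv_acc]; simp
  · rfl

theorem pvIv_exit (limit tile_size stride : Int) (fuel : Nat) (p : Int) (h : ¬ p < limit) :
    pvIv limit tile_size stride fuel p [] = [] := by
  cases fuel with
  | zero => rfl
  | succ n => simp [pvIv, h]

-- A's inner row loop is the tagged 1-D table
theorem pvRowA_eq (img_w tile_size stride y y2 : Int) (fuel : Nat) (x : Int) (acc : List (Int × Int × Int × Int)) :
    pvRowA img_w tile_size stride y y2 fuel x acc
      = acc ++ (pvIv img_w tile_size stride fuel x []).map (fun xp => (xp.1, y, xp.2, y2)) := by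
  induction fuel generalizing x acc with
  | zero => simp [pvRowA, pvIv]
  | succ n ih =>
    simp only [pvRowA]
    rw [pvIv_cons img_w tile_size stride n x]
    split_ifs with h1 h2
    · simp
    · rw [ih]; simp
    · simp

-- A's outer loop is the flatMap of the y-table over the x-table
theorem pvColA_eq (img_w img_h tile_size stride : Int) (fuel : Nat) (y : Int) (acc : List (Int × Int × Int × Int)) :
    pvColA img_w img_h tile_size stride fuel y acc
      = acc ++ (pvIv img_h tile_size stride fuel y []).flatMap
          (fun yp => (pvIv img_w tile_size stride (img_w.toNat + 1) 0 []).map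
            (fun xp => (xp.1, yp.1, xp.2, yp.2))) := by
  induction fuel generalizing y acc with
  | zero => simp [pvColA, pvIv]
  | succ n ih =>
    simp only [pvColA]
    rw [pvIv_cons img_h tile_size stride n y]
    split_ifs with h1 h2
    · rw [pvRowA_eq]; simp
    · rw [ih, pvRowA_eq]; simp
    · simp

-- the 1-D loop from position j*s equals the range-indexed closed form (main case)
theorem pvIv_closed_pos (limit tile s c1 c2 : Int) (hs : 0 < s)
    (hc1 : (c1 - 1) * s < limit ∧ limit ≤ c1 * s)
    (hc2 : (c2 - 1) * s < limit - tile ∧ limit - tile ≤ c2 * s) :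
    ∀ (fuel : Nat) (j : Int), 0 ≤ j → j < min c1 (c2 + 1) →
      (min c1 (c2 + 1) - j).toNat + 1 ≤ fuel →
      pvIv limit tile s fuel (j * s) []
        = (PySem.List.pyRange j (min c1 (c2 + 1)) 1).map (fun k => (k * s, min (k * s + tile) limit)) := by
  intro fuel
  induction fuel with
  | zero => intro j _ _ hf; omega
  | succ m ih =>
    intro j hj0 hjn hf
    have hjc1 : j ≤ c1 - 1 := by omega
    have hjs : j * s < limit := by nlinarith [hc1.1]
    rw [pvIv_cons, if_pos hjs]
    by_cases hbr : min (j * s + tile) limit = limit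
    · -- break: j*s + tile ≥ limit, so this is the last index and the range is [j]
      have hge : limit ≤ j * s + tile := by
        by_contra hlt
        push_neg at hlt
        rw [min_eq_left (le_of_lt hlt)] at hbr
        omega
      have hc2j : c2 ≤ j := by nlinarith [hc2.1]
      have hlast : min c1 (c2 + 1) = j + 1 := by omega
      rw [if_pos hbr, hlast, PySem.List.pyRange_one_cons (by omega : j < j + 1),
          PySem.List.pyRange_one_eq_nil (by omega : j + 1 ≤ j + 1)]
      simp [hbr]
    · rw [if_neg hbr]
      have hlt : j * s + tile < limit := by
        by_contra hge
        push_neg at hge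
        exact hbr (min_eq_right hge)
      have hjc2 : j < c2 := by nlinarith [hc2.2]
      by_cases hjn1 : j + 1 < min c1 (c2 + 1)
      · have := ih (j + 1) (by omega) hjn1 (by omega)
        rw [show j * s + s = (j + 1) * s by ring, this,
            PySem.List.pyRange_one_cons hjn]
        simp
      · -- j+1 = n and n = c1, so the next position exits the loop
        have hn1 : min c1 (c2 + 1) = j + 1 := by omega
        have hnc1 : c1 = j + 1 := by omega
        have hexit : ¬ j * s + s < limit := by nlinarith [hc1.2]
        rw [pvIv_exit limit tile s m (j * s + s) hexit, hn1,
            PySem.List.pyRange_one_cons (by omega : j < j + 1),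
            PySem.List.pyRange_one_eq_nil (by omega : j + 1 ≤ j + 1)]
        simp

-- the 1-D loop with A's fuel equals B's closed form, on every terminating axis
theorem pvIv_closed (limit tile s : Int) (H : 0 < s ∨ limit ≤ 0 ∨ limit ≤ tile) :
    pvIv limit tile s (limit.toNat + 1) 0 []
      = (PySem.List.pyRange 0 (pvCountB tile s limit) 1).map (fun k => (k * s, min (k * s + tile) limit)) := by
  by_cases hl : limit ≤ 0
  · have h0 : ¬ (0 : Int) < limit := by omega
    have hT : limit.toNat = 0 := by omega
    rw [hT, pvIv_cons, if_neg h0]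
    simp [pvCountB, hl, PySem.List.pyRange_one_eq_nil (by omega : (0:Int) ≤ 0)]
  · push_neg at hl
    by_cases htl : limit ≤ tile
    · obtain ⟨m, hm⟩ : ∃ m, limit.toNat + 1 = m + 1 := ⟨limit.toNat, rfl⟩
      have hmin : min ((0:Int) + tile) limit = limit := min_eq_right (by omega)
      rw [hm, pvIv_cons, if_pos hl, if_pos hmin]
      have hcount : pvCountB tile s limit = 1 := by simp [pvCountB, htl]; omega
      rw [hcount, PySem.List.pyRange_one_cons (by norm_num : (0:Int) < 1),
          PySem.List.pyRange_one_eq_nil (by norm_num : (1:Int) ≤ 0 + 1)]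
      simp
    · push_neg at htl
      have hs : 0 < s := by
        rcases H with h | h | h
        · exact h
        · omega
        · omega
      have hc1 := (PySem.Int.neg_floordiv_neg_eq_iff_of_pos (a := limit)
        (q := -(PySem.Int.floordiv (-limit) s)) hs).mp rfl
      have hc2 := (PySem.Int.neg_floordiv_neg_eq_iff_of_pos (a := limit - tile)
        (q := -(PySem.Int.floordiv (-(limit - tile)) s)) hs).mp rfl
      set c1 := -(PySem.Int.floordiv (-limit) s) with hc1def
      set c2 := -(PySem.Int.floordiv (-(limit - tile)) s) with hc2def
      have h1c1 : 1 ≤ c1 := by nlinarith [hc1.2]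
      have h1c2 : 1 ≤ c2 := by nlinarith [hc2.2]
      have hc1l : c1 ≤ limit := by nlinarith [hc1.1]
      have hcount : pvCountB tile s limit = min c1 (c2 + 1) := by
        simp [pvCountB, hc1def, hc2def]
        omega
      have hkey := pvIv_closed_pos limit tile s c1 c2 hs hc1 hc2 (limit.toNat + 1) 0
        (le_refl 0) (by omega) (by omega)
      simp only [zero_mul] at hkey
      rw [hkey, hcount]
  
-- B's count is nonzero on a positive terminating axis
theorem pvCountB_pos (tile s limit : Int) (hl : 0 < limit) (H : 0 < s ∨ limit ≤ tile) :
    1 ≤ pvCountB tile s limit := by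
  unfold pvCountB
  rw [if_neg (by omega)]
  by_cases htl : tile ≥ limit
  · rw [if_pos htl]
  · rw [if_neg htl]
    push_neg at htl
    have hs : 0 < s := by rcases H with h | h; exact h; omega
    have hc1 := (PySem.Int.neg_floordiv_neg_eq_iff_of_pos (a := limit)
      (q := -(PySem.Int.floordiv (-limit) s)) hs).mp rfl
    have hc2 := (PySem.Int.neg_floordiv_neg_eq_iff_of_pos (a := limit - tile)
      (q := -(PySem.Int.floordiv (-(limit - tile)) s)) hs).mp rfl
    have h1 : 1 ≤ -(PySem.Int.floordiv (-limit) s) := by nlinarith [hc1.2]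
    have h2 : 1 ≤ -(PySem.Int.floordiv (-(limit - tile)) s) := by nlinarith [hc2.2]
    omega

-- ===== VERDICT =====
theorem compute_tiles_spec : Claim_equal_compute_tiles := by
  intro img_w img_h tile_size overlap _ hpre
  unfold Spec_compute_tiles compute_tiles
  rw [pvColA_eq]
  set s := tile_size - overlap with hsdef
  by_cases hh : img_h ≤ 0
  · rw [pvIv_closed img_h tile_size s (Or.inr (Or.inl hh))]
    have : pvCountB tile_size s img_h = 0 := by simp [pvCountB, hh]
    simp [compute_tiles_alt, ← hsdef, this, PySem.List.pyRange_one_eq_nil (by omega : (0:Int) ≤ 0)]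
  · push_neg at hh
    have Hh : 0 < s ∨ img_h ≤ 0 ∨ img_h ≤ tile_size := by
      unfold Pre_compute_tiles at hpre; rw [← hsdef] at hpre; tauto
    have Hw : 0 < s ∨ img_w ≤ 0 ∨ img_w ≤ tile_size := by
      unfold Pre_compute_tiles at hpre; rw [← hsdef] at hpre
      rcases hpre with h | h | h
      · exact Or.inl h
      · omega
      · rcases h.2 with h2 | h2
        · exact Or.inr (Or.inl h2)
        · exact Or.inr (Or.inr h2)
    have Hhs : 0 < s ∨ img_h ≤ tile_size := by
      rcases Hh with h | h | h
      · exact Or.inl h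
      · omega
      · exact Or.inr h
    have hny : pvCountB tile_size s img_h ≠ 0 := by
      have := pvCountB_pos tile_size s img_h hh Hhs; omega
    rw [pvIv_closed img_h tile_size s Hh, pvIv_closed img_w tile_size s Hw]
    unfold compute_tiles_alt
    rw [← hsdef, if_neg hny]
    simp [List.flatMap_map, List.map_map, Function.comp_def]
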